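-- pv_equiv track=rewrite | github.com/Aviroop07/NL2DATA | NL2DATA/phases/phase1/step_1_2_entity_mention_detection.py | _iter_list_items_with_spans
-- ===== SOURCE A (Python) =====
-- from typing import List, Iterable, Tuple
--
-- def _iter_list_items_with_spans(list_text: str, base_start: int) -> Iterable[Tuple[str, int, int]]:
--     """
--     Split a comma-separated list like:
--       "purchase orders, shipments, inventory snapshots, and customer orders"
--     into item spans relative to the original nl_description (via base_start).
--
--     Returns tuples of (item_text, abs_start, abs_end) where item_text is the
--     verbatim substring slice and [abs_start:abs_end] is the slice in the original
--     description.
--     """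
--     if not list_text:
--         return
--
--     i = 0
--     n = len(list_text)
--     while i < n:
--         j = list_text.find(",", i)
--         if j == -1:
--             j = n
--
--         seg_start = i
--         seg_end = j
--         i = j + 1  # skip comma
--
--         # Trim whitespace bounds.
--         while seg_start < seg_end and list_text[seg_start].isspace():
--             seg_start += 1
--         while seg_end > seg_start and list_text[seg_end - 1].isspace():
--             seg_end -= 1
--         if seg_end <= seg_start:
--             continue
--
--         # Remove leading conjunction "and " / "& " (common in final item).
--         lower = list_text[seg_start:seg_end].lower()
--         if lower.startswith("and "):
--             seg_start += 4
--             while seg_start < seg_end and list_text[seg_start].isspace():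
--                 seg_start += 1
--         elif lower.startswith("& "):
--             seg_start += 2
--             while seg_start < seg_end and list_text[seg_start].isspace():
--                 seg_start += 1
--
--         if seg_end <= seg_start:
--             continue
--
--         abs_start = base_start + seg_start
--         abs_end = base_start + seg_end
--         yield list_text[seg_start:seg_end], abs_start, abs_end
-- ===== SOURCE B (Python) =====
-- def _iter_list_items_with_spans(list_text, base_start):
--     offset = 0
--     for seg in list_text.split(","):
--         stripped = seg.strip()
--         if stripped:
--             low = stripped.lower()
--             if low.startswith("and "):
--                 item = stripped[4:].lstrip()
--             elif low.startswith("& "):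
--                 item = stripped[2:].lstrip()
--             else:
--                 item = stripped
--             end = offset + (len(seg) - len(seg.lstrip())) + len(stripped)
--             yield item, base_start + end - len(item), base_start + end
--         offset += len(seg) + 1
-- ===== Notes on version B (the rewrite author's own statement) =====
-- stated objective: simpler
-- what changed: A's hand-rolled index scanning (find(',') with while-loops advancing/retreating trim indices) is replaced by split(',') plus a running offset, computing each trimmed span arithmetically from lstrip/strip lengths and handling the leading 'and '/'& ' conjunction on the stripped text.
import Mathlib
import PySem

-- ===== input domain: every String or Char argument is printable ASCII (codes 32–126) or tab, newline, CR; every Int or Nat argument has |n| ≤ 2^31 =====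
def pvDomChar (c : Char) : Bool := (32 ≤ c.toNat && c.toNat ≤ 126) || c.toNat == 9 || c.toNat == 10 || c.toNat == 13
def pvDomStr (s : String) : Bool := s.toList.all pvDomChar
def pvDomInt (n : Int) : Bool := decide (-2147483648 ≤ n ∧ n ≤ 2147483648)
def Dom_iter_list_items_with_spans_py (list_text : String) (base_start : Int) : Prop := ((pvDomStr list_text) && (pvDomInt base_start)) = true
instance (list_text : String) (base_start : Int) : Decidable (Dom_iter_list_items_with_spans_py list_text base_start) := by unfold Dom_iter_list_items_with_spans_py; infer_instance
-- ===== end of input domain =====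

-- B replaces A's hand-rolled index/find/trim while-loops by split(",") plus a running
-- offset, computing each trimmed span from lstrip/strip lengths (objective: simpler).

-- `str.isspace` for a single char; exact on the domain's character set (space, tab, LF, CR)
def pvIsSpace (c : Char) : Bool := c == ' ' || c == '\t' || c == '\n' || c == '\r'

-- ===== PORT A =====
-- `list_text.find(",", i)`: scan from index i, returning the length when absent
def pvFindAux : List Char → Nat → Nat
  | [], k => k
  | c :: rest, k => if c == ',' then k else pvFindAux rest (k + 1)

theorem pvFindAux_ge (l : List Char) (k : Nat) : k ≤ pvFindAux l k := by
  induction l generalizing k with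
  | nil => simp [pvFindAux]
  | cons c rest ih =>
    simp only [pvFindAux]
    split
    · exact Nat.le_refl _
    · exact Nat.le_trans (Nat.le_succ _) (ih (k + 1))

def pvFindComma (cs : List Char) (i : Nat) : Nat := pvFindAux (cs.drop i) i

-- A's `while seg_start < seg_end and list_text[seg_start].isspace(): seg_start += 1`
def pvSkipFwd (cs : List Char) (s e : Nat) : Nat :=
  if h : s < e ∧ pvIsSpace (cs.getD s ' ') then pvSkipFwd cs (s + 1) e else s
termination_by e - s
decreasing_by omega

-- A's `while seg_end > seg_start and list_text[seg_end - 1].isspace(): seg_end -= 1`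
def pvSkipBack (cs : List Char) (s e : Nat) : Nat :=
  if h : s < e ∧ pvIsSpace (cs.getD (e - 1) ' ') then pvSkipBack cs s (e - 1) else e
termination_by e - s
decreasing_by omega

-- A's `while i < n:` loop, step for step
def pvLoopA (cs : List Char) (base : Int) (i : Nat) : List (String × Int × Int) :=
  if hin : i < cs.length then
    let j := pvFindComma cs i
    let s1 := pvSkipFwd cs i j
    let e1 := pvSkipBack cs s1 j
    let rest := pvLoopA cs base (j + 1)
    if e1 ≤ s1 then rest
    else
      let lower := ((cs.drop s1).take (e1 - s1)).map Char.toLower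
      let s2 :=
        if lower.take 4 = ['a', 'n', 'd', ' '] then pvSkipFwd cs (s1 + 4) e1
        else if lower.take 2 = ['&', ' '] then pvSkipFwd cs (s1 + 2) e1
        else s1
      if e1 ≤ s2 then rest
      else (String.ofList ((cs.drop s2).take (e1 - s2)), base + (s2 : Int), base + (e1 : Int)) :: rest
  else []
termination_by cs.length - i
decreasing_by have := pvFindAux_ge (cs.drop i) i; simp only [pvFindComma] at *; omega

def iter_list_items_with_spans_py (list_text : String) (base_start : Int) : List (String × Int × Int) :=
  if list_text.toList = [] then [] else pvLoopA list_text.toList base_start 0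

-- ===== PORT B =====
-- `list_text.split(",")`
def pvSplitComma : List Char → List (List Char)
  | [] => [[]]
  | c :: rest =>
    if c == ',' then [] :: pvSplitComma rest
    else
      match pvSplitComma rest with
      | [] => [[c]]
      | s :: ss => (c :: s) :: ss

def pvLStrip (l : List Char) : List Char := l.dropWhile pvIsSpace
def pvRStrip (l : List Char) : List Char := (l.reverse.dropWhile pvIsSpace).reverse
def pvStrip (l : List Char) : List Char := pvRStrip (pvLStrip l)

-- Source B's `for seg in list_text.split(","):` loop with its running offset
def pvLoopB (base : Int) (offset : Int) : List (List Char) → List (String × Int × Int)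
  | [] => []
  | seg :: rest =>
    let stripped := pvStrip seg
    let out :=
      if stripped.isEmpty then ([] : List (String × Int × Int))
      else
        let low := stripped.map Char.toLower
        let item :=
          if low.take 4 = ['a', 'n', 'd', ' '] then pvLStrip (stripped.drop 4)
          else if low.take 2 = ['&', ' '] then pvLStrip (stripped.drop 2)
          else stripped
        let e : Int := offset + ((seg.length : Int) - ((pvLStrip seg).length : Int)) + (stripped.length : Int)
        [(String.ofList item, base + e - (item.length : Int), base + e)]
    out ++ pvLoopB base (offset + (seg.length : Int) + 1) rest

def iter_list_items_with_spans_py_alt (list_text : String) (base_start : Int) : List (String × Int × Int) :=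
  pvLoopB base_start 0 (pvSplitComma list_text.toList)

-- ===== PRECONDITION & SPEC =====
def Spec_iter_list_items_with_spans_py (list_text : String) (base_start : Int) (out : List (String × Int × Int)) : Prop := out = iter_list_items_with_spans_py_alt list_text base_start
instance (list_text : String) (base_start : Int) (out : List (String × Int × Int)) : Decidable (Spec_iter_list_items_with_spans_py list_text base_start out) := by unfold Spec_iter_list_items_with_spans_py; infer_instance

-- ===== CLAIM (what is proved, stated in full; the proofs are below) =====
def Claim_equal_iter_list_items_with_spans_py : Prop := ∀ (list_text : String) (base_start : Int), Dom_iter_list_items_with_spans_py list_text base_start → Spec_iter_list_items_with_spans_py list_text base_start (iter_list_items_with_spans_py list_text base_start)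

-- ===== LEMMAS AND PROOFS =====

theorem takeWhile_eq_take {α : Type} (p : α → Bool) (l : List α) :
    l.takeWhile p = l.take (l.takeWhile p).length := by
  induction l with
  | nil => rfl
  | cons c rest ih =>
    by_cases h : p c
    · rw [List.takeWhile_cons_of_pos h, List.length_cons, List.take_succ_cons, ← ih]
    · rw [List.takeWhile_cons_of_neg (by simp [h]), List.length_nil, List.take_zero]

theorem dropWhile_eq_drop {α : Type} (p : α → Bool) (l : List α) :
    l.dropWhile p = l.drop (l.takeWhile p).length := by
  induction l with
  | nil => rfl
  | cons c rest ih =>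
    by_cases h : p c <;> simp [List.takeWhile_cons, List.dropWhile_cons, h, ih]

theorem pvFindAux_eq (l : List Char) (k : Nat) :
    pvFindAux l k = k + (l.takeWhile (fun c => !(c == ','))).length := by
  induction l generalizing k with
  | nil => simp [pvFindAux]
  | cons c rest ih =>
    by_cases h : c == ','
    · simp [pvFindAux, h, List.takeWhile_cons]
    · simp only [pvFindAux, h, if_false, ih, List.takeWhile_cons, Bool.not_eq_true']
      simp [h]
      omega

theorem pvSkipFwd_eq (cs : List Char) (s e : Nat) (hse : s ≤ e) (hel : e ≤ cs.length) :
    pvSkipFwd cs s e = s + (((cs.drop s).take (e - s)).takeWhile pvIsSpace).length := by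
  fun_induction pvSkipFwd cs s e with
  | case1 s h ih =>
    obtain ⟨hse', hsp⟩ := h
    have hs : s < cs.length := Nat.lt_of_lt_of_le hse' hel
    have hdrop : cs.drop s = cs[s] :: cs.drop (s + 1) := by
      rw [List.drop_eq_getElem_cons hs]
    have hget : cs.getD s ' ' = cs[s] := List.getD_eq_getElem cs ' ' hs
    have htake : (cs.drop s).take (e - s) = cs[s] :: (cs.drop (s + 1)).take (e - (s + 1)) := by
      rw [hdrop]
      have : e - s = (e - (s + 1)) + 1 := by omega
      rw [this, List.take_succ_cons]
    rw [htake, List.takeWhile_cons_of_pos (by rwa [hget] at hsp), List.length_cons,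
      ih hse']
    omega
  | case2 s h =>
    rcases Nat.lt_or_ge s e with hlt | hge
    · have hs : s < cs.length := Nat.lt_of_lt_of_le hlt hel
      have hget : cs.getD s ' ' = cs[s] := List.getD_eq_getElem cs ' ' hs
      have hsp : pvIsSpace cs[s] = false := by
        by_contra hc
        exact h ⟨hlt, by rw [hget]; simpa using hc⟩
      have hdrop : cs.drop s = cs[s] :: cs.drop (s + 1) := by
        rw [List.drop_eq_getElem_cons hs]
      have htake : (cs.drop s).take (e - s) = cs[s] :: (cs.drop (s + 1)).take (e - (s + 1)) := by
        rw [hdrop]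
        have : e - s = (e - (s + 1)) + 1 := by omega
        rw [this, List.take_succ_cons]
      rw [htake, List.takeWhile_cons_of_neg (by simp [hsp])]
      simp
    · have h0 : e - s = 0 := by omega
      simp [h0]

theorem pvSkipBack_eq (cs : List Char) (s e : Nat) (hse : s ≤ e) (hel : e ≤ cs.length) :
    pvSkipBack cs s e = s + (pvRStrip ((cs.drop s).take (e - s))).length := by
  fun_induction pvSkipBack cs s e with
  | case1 e h ih =>
    obtain ⟨hse', hsp⟩ := h
    have he : e - 1 < cs.length := by omega
    have hget : cs.getD (e - 1) ' ' = cs[e - 1] := List.getD_eq_getElem cs ' ' he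
    have htake : (cs.drop s).take (e - s) = (cs.drop s).take (e - 1 - s) ++ [cs[e - 1]] := by
      have h1 : e - s = (e - 1 - s) + 1 := by omega
      rw [h1, List.take_succ]
      have hidx : (cs.drop s)[e - 1 - s]? = some cs[e - 1] := by
        rw [List.getElem?_drop, List.getElem?_eq_getElem (by omega)]
        simp only [show s + (e - 1 - s) = e - 1 from by omega]
      simp [hidx]
    rw [htake]
    have hrs : pvRStrip ((cs.drop s).take (e - 1 - s) ++ [cs[e - 1]])
        = pvRStrip ((cs.drop s).take (e - 1 - s)) := by
      simp [pvRStrip, List.dropWhile_cons, hget ▸ hsp]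
    rw [hrs, ih (by omega) (by omega)]
  | case2 e h =>
    rcases Nat.lt_or_ge s e with hlt | hge
    · have he : e - 1 < cs.length := by omega
      have hget : cs.getD (e - 1) ' ' = cs[e - 1] := List.getD_eq_getElem cs ' ' he
      have hsp : pvIsSpace cs[e - 1] = false := by
        by_contra hc
        exact h ⟨hlt, by rw [hget]; simpa using hc⟩
      have htake : (cs.drop s).take (e - s) = (cs.drop s).take (e - 1 - s) ++ [cs[e - 1]] := by
        have h1 : e - s = (e - 1 - s) + 1 := by omega
        rw [h1, List.take_succ]
        have hidx : (cs.drop s)[e - 1 - s]? = some cs[e - 1] := by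
          rw [List.getElem?_drop, List.getElem?_eq_getElem (by omega)]
          simp only [show s + (e - 1 - s) = e - 1 from by omega]
        simp [hidx]
      rw [htake]
      have hrs : pvRStrip ((cs.drop s).take (e - 1 - s) ++ [cs[e - 1]])
          = (cs.drop s).take (e - 1 - s) ++ [cs[e - 1]] := by
        simp [pvRStrip, List.dropWhile_cons, hsp]
      rw [hrs]
      simp [List.length_take, List.length_drop]
      omega
    · have h0 : e - s = 0 := by omega
      simp [h0, pvRStrip]
      omega

theorem pvSplitComma_eq (l : List Char) :
    pvSplitComma l = l.takeWhile (fun c => !(c == ',')) ::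
      (match l.dropWhile (fun c => !(c == ',')) with
       | [] => []
       | _ :: r => pvSplitComma r) := by
  induction l with
  | nil => simp [pvSplitComma]
  | cons c rest ih =>
    by_cases h : c == ','
    · simp [pvSplitComma, h, List.takeWhile_cons, List.dropWhile_cons]
    · simp only [pvSplitComma, h, if_false, ih, List.takeWhile_cons, List.dropWhile_cons,
        Bool.not_eq_true']
      simp [h]

theorem pvRStrip_eq (l : List Char) :
    pvRStrip l = l.take (l.length - (l.reverse.takeWhile pvIsSpace).length) := by
  unfold pvRStrip
  rw [dropWhile_eq_drop, List.drop_reverse, List.reverse_reverse]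

theorem pvRStrip_eq_take (l : List Char) :
    pvRStrip l = l.take (pvRStrip l).length := by
  conv_lhs => rw [pvRStrip_eq]
  rw [pvRStrip_eq, List.length_take, Nat.min_eq_left (Nat.sub_le _ _)]

theorem pvRStrip_last_not_space (l : List Char) (c : Char) (h : (pvRStrip l).getLast? = some c) :
    pvIsSpace c = false := by
  unfold pvRStrip at h
  rw [List.getLast?_reverse] at h
  have hne : l.reverse.dropWhile pvIsSpace ≠ [] := by
    intro hc; rw [hc] at h; simp at h
  have hh := List.head_dropWhile_not (p := pvIsSpace) hne
  rw [List.head?_eq_head hne] at h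
  have : (l.reverse.dropWhile pvIsSpace).head hne = c := by simpa using h
  rw [this] at hh
  simpa using hh

theorem pvLStrip_ne_nil (l : List Char) (c : Char) (h : c ∈ l) (hc : pvIsSpace c = false) :
    pvLStrip l ≠ [] := by
  intro hnil
  have := (List.dropWhile_eq_nil_iff).1 hnil c h
  rw [hc] at this
  exact Bool.false_ne_true this

theorem pvToLower_space (c : Char) (h : c.toLower = ' ') : c = ' ' := by
  simp only [Char.toLower] at h
  split at h
  · rename_i hc
    exfalso
    have h1 := congrArg (fun x : Char => x.val.toNat) h
    simp [UInt32.toNat_add] at h1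
    have h2 : ('A').val.toNat ≤ c.val.toNat := UInt32.le_iff_toNat_le.mp hc.1
    have h3 : c.val.toNat ≤ ('Z').val.toNat := UInt32.le_iff_toNat_le.mp hc.2
    simp at h2 h3
    omega
  · exact h

theorem pvRStrip_length_le (l : List Char) : (pvRStrip l).length ≤ l.length := by
  rw [pvRStrip_eq]
  simp

theorem slice_sub (cs : List Char) (s m k t : Nat) (l : List Char)
    (h : (cs.drop s).take m = l) (ht : t ≤ m - k) :
    (cs.drop (s + k)).take t = (l.drop k).take t := by
  subst h
  rw [← List.drop_drop, List.drop_take, List.take_take, Nat.min_eq_left ht]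

theorem pvLoopA_end (cs : List Char) (base : Int) (i : Nat) (h : cs.length ≤ i) :
    pvLoopA cs base i = [] := by
  rw [pvLoopA]
  simp [Nat.not_lt.2 h]

theorem pvConjCase (cs : List Char) (i a k : Nat) (st : List Char) (cl : Char)
    (hslice_st : (cs.drop (i + a)).take st.length = st)
    (hbound : i + a + st.length ≤ cs.length)
    (hk : k + 1 ≤ st.length)
    (hcl : st.getLast? = some cl) (hclns : pvIsSpace cl = false) :
    pvLStrip (st.drop k) ≠ []
    ∧ k + (pvLStrip (st.drop k)).length ≤ st.length
    ∧ pvSkipFwd cs (i + a + k) (i + a + st.length)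
        = i + a + st.length - (pvLStrip (st.drop k)).length
    ∧ (cs.drop (i + a + st.length - (pvLStrip (st.drop k)).length)).take
        (pvLStrip (st.drop k)).length = pvLStrip (st.drop k) := by
  set c := ((st.drop k).takeWhile pvIsSpace).length with hc
  have hc_le : c ≤ st.length - k := by
    have := (List.takeWhile_sublist pvIsSpace (l := st.drop k)).length_le
    simpa [hc] using this
  have hitem : pvLStrip (st.drop k) = st.drop (k + c) := by
    rw [pvLStrip, dropWhile_eq_drop, ← hc, List.drop_drop]
  have hitemlen : (pvLStrip (st.drop k)).length = st.length - k - c := by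
    rw [hitem]; simp; omega
  have hcl_idx : st[st.length - 1]? = some cl := by
    rw [← List.getLast?_eq_getElem?]; exact hcl
  have hmem : cl ∈ st.drop k := by
    have h9 : (st.drop k)[st.length - 1 - k]? = some cl := by
      rw [List.getElem?_drop, show k + (st.length - 1 - k) = st.length - 1 from by omega]
      exact hcl_idx
    exact List.mem_of_getElem? h9
  have hne : pvLStrip (st.drop k) ≠ [] := pvLStrip_ne_nil _ cl hmem hclns
  refine ⟨hne, by omega, ?_, ?_⟩
  · rw [pvSkipFwd_eq cs _ _ (by omega) (by omega)]
    have hsl : (cs.drop (i + a + k)).take (i + a + st.length - (i + a + k)) = st.drop k := by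
      rw [show i + a + st.length - (i + a + k) = st.length - k from by omega]
      rw [show i + a + k = (i + a) + k from rfl]
      rw [slice_sub cs (i + a) st.length k (st.length - k) st hslice_st (le_refl _)]
      rw [show st.length - k = (st.drop k).length from by simp]
      exact List.take_length
    rw [hsl, ← hc, hitemlen]
    omega
  · rw [hitemlen, hitem]
    rw [show i + a + st.length - (st.length - k - c) = (i + a) + (k + c) from by omega]
    rw [slice_sub cs (i + a) st.length (k + c) (st.length - k - c) st hslice_st (by omega)]
    rw [show st.length - k - c = (st.drop (k + c)).length from by simp [Nat.sub_sub]]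
    exact List.take_length

-- B's per-segment output (the body of Source B's loop for one raw segment), used by the proofs
def pvSegOut (base offset : Int) (seg : List Char) : List (String × Int × Int) :=
  let stripped := pvStrip seg
  if stripped.isEmpty then ([] : List (String × Int × Int))
  else
    let low := stripped.map Char.toLower
    let item :=
      if low.take 4 = ['a', 'n', 'd', ' '] then pvLStrip (stripped.drop 4)
      else if low.take 2 = ['&', ' '] then pvLStrip (stripped.drop 2)
      else stripped
    let e : Int := offset + ((seg.length : Int) - ((pvLStrip seg).length : Int)) + (stripped.length : Int)
    [(String.ofList item, base + e - (item.length : Int), base + e)]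

theorem pvLoopB_step (base offset : Int) (seg : List Char) (rest : List (List Char)) :
    pvLoopB base offset (seg :: rest)
      = pvSegOut base offset seg ++ pvLoopB base (offset + (seg.length : Int) + 1) rest := rfl

theorem pvLoopA_step (cs : List Char) (base : Int) (i : Nat) (hin : i < cs.length) :
    pvLoopA cs base i
      = pvSegOut base (i : Int) ((cs.drop i).takeWhile (fun c => !(c == ',')))
        ++ pvLoopA cs base (i + ((cs.drop i).takeWhile (fun c => !(c == ','))).length + 1) := by
  set p : Char → Bool := fun c => !(c == ',') with hp
  set seg : List Char := (cs.drop i).takeWhile p with hseg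
  have hseglen : seg.length ≤ cs.length - i := by
    have := (List.takeWhile_sublist p (l := cs.drop i)).length_le
    simpa [hseg] using this
  have hj : pvFindComma cs i = i + seg.length := by
    rw [pvFindComma, pvFindAux_eq, ← hp, ← hseg]
  have hslice_ij : (cs.drop i).take seg.length = seg := by
    rw [hseg]; exact (takeWhile_eq_take p (cs.drop i)).symm
  set a : Nat := (seg.takeWhile pvIsSpace).length with ha
  have ha_le : a ≤ seg.length := (List.takeWhile_sublist pvIsSpace (l := seg)).length_le
  set ls : List Char := pvLStrip seg with hls
  have hls_drop : ls = seg.drop a := by rw [hls, pvLStrip, dropWhile_eq_drop]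
  have hlslen : ls.length = seg.length - a := by rw [hls_drop]; simp
  set st : List Char := pvStrip seg with hst
  have hstlen : st.length ≤ ls.length := by
    rw [hst, pvStrip, ← hls]; exact pvRStrip_length_le ls
  have hs1 : pvSkipFwd cs i (i + seg.length) = i + a := by
    rw [pvSkipFwd_eq cs i (i + seg.length) (by omega) (by omega)]
    congr 1
    rw [ha]
    congr 1
    rw [show i + seg.length - i = seg.length from by omega, hslice_ij]
  have hslice_s1 : (cs.drop (i + a)).take (seg.length - a) = ls := by
    rw [slice_sub cs i seg.length a (seg.length - a) seg hslice_ij (by omega)]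
    rw [← hls_drop, ← hlslen, List.take_length]
  have he1 : pvSkipBack cs (i + a) (i + seg.length) = i + a + st.length := by
    rw [pvSkipBack_eq cs (i + a) (i + seg.length) (by omega) (by omega)]
    congr 2
    rw [show i + seg.length - (i + a) = seg.length - a from by omega, hslice_s1,
      hst, pvStrip, hls]
  have hslice_st : (cs.drop (i + a)).take st.length = st := by
    have h1 : (cs.drop (i + a)).take st.length
        = ((cs.drop (i + a)).take (seg.length - a)).take st.length := by
      rw [List.take_take, Nat.min_eq_left (by omega)]
    rw [h1, hslice_s1, hst, pvStrip, ← hls]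
    exact (pvRStrip_eq_take ls).symm
  rw [pvLoopA, dif_pos hin]
  simp only [hj, hs1, he1]
  rw [show i + a + st.length - (i + a) = st.length from by omega, hslice_st]
  simp only [pvSegOut]
  simp only [← hst, ← hls]
  by_cases hempty : st = []
  · rw [if_pos (by simp [hempty]), if_pos (by simp [hempty])]
    simp
  · have hstpos : st.length ≠ 0 := by simpa [List.length_eq_zero_iff] using hempty
    rw [if_neg (show ¬ (st.isEmpty = true) from by simpa [List.isEmpty_iff] using hempty)]
    rw [if_neg (show ¬ (i + a + st.length ≤ i + a) from by omega)]
    obtain ⟨cl, hcl⟩ : ∃ cl, st.getLast? = some cl := by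
      rcases st with _ | ⟨x, xs⟩
      · exact absurd rfl hempty
      · exact ⟨_, List.getLast?_eq_getLast (by simp)⟩
    have hclns : pvIsSpace cl = false := by
      apply pvRStrip_last_not_space ls cl
      rw [hls]
      show (pvStrip seg).getLast? = some cl
      rw [← hst]
      exact hcl
    have hcl_idx : st[st.length - 1]? = some cl := by
      rw [← List.getLast?_eq_getElem?]; exact hcl
    by_cases hand : List.take 4 (List.map Char.toLower st) = ['a', 'n', 'd', ' ']
    · simp only [if_pos hand]
      have hlen4 : 4 ≤ st.length := by
        have hl := congrArg List.length hand
        simp at hl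
        omega
      have h3 : ∃ ch, st[3]? = some ch ∧ ch.toLower = ' ' := by
        have h4 := congrArg (fun l : List Char => l[3]?) hand
        simp [List.getElem?_take, List.getElem?_map] at h4
        exact h4
      obtain ⟨ch, hch1, hch2⟩ := h3
      have hchsp : ch = ' ' := pvToLower_space ch hch2
      have hlen5 : 5 ≤ st.length := by
        by_contra h5
        have h40 : st.length = 4 := by omega
        rw [h40] at hcl_idx
        simp at hcl_idx
        rw [hch1] at hcl_idx
        rw [show ch = cl from by simpa using hcl_idx] at hchsp
        rw [hchsp] at hclns
        simp [pvIsSpace] at hclns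
      obtain ⟨hne, hkle, hskip, hsl⟩ :=
        pvConjCase cs i a 4 st cl hslice_st (by omega) (by omega) hcl hclns
      have hitempos : (pvLStrip (st.drop 4)).length ≠ 0 := by
        simpa [List.length_eq_zero_iff] using hne
      rw [hskip]
      rw [if_neg (show ¬ (i + a + st.length ≤ i + a + st.length - (pvLStrip (st.drop 4)).length)
        from by omega)]
      rw [show i + a + st.length - (i + a + st.length - (pvLStrip (st.drop 4)).length)
            = (pvLStrip (st.drop 4)).length from by omega, hsl]
      simp only [List.singleton_append]
      congr 1
      have h2 : (base + ((i + a + st.length - (pvLStrip (st.drop 4)).length : Nat) : Int) : Int)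
          = base + ((i : Int) + (((seg.length : Nat) : Int) - ((ls.length : Nat) : Int))
              + ((st.length : Nat) : Int)) - (((pvLStrip (st.drop 4)).length : Nat) : Int) := by
        omega
      have h3' : (base + ((i + a + st.length : Nat) : Int) : Int)
          = base + ((i : Int) + (((seg.length : Nat) : Int) - ((ls.length : Nat) : Int))
              + ((st.length : Nat) : Int)) := by
        omega
      rw [h2, h3']
    · simp only [if_neg hand]
      by_cases hamp : List.take 2 (List.map Char.toLower st) = ['&', ' ']
      · simp only [if_pos hamp]
        have hlen2 : 2 ≤ st.length := by
          have hl := congrArg List.length hamp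
          simp at hl
          omega
        have h3 : ∃ ch, st[1]? = some ch ∧ ch.toLower = ' ' := by
          have h4 := congrArg (fun l : List Char => l[1]?) hamp
          simp [List.getElem?_take, List.getElem?_map] at h4
          exact h4
        obtain ⟨ch, hch1, hch2⟩ := h3
        have hchsp : ch = ' ' := pvToLower_space ch hch2
        have hlen3 : 3 ≤ st.length := by
          by_contra h5
          have h20 : st.length = 2 := by omega
          rw [h20] at hcl_idx
          simp at hcl_idx
          rw [hch1] at hcl_idx
          rw [show ch = cl from by simpa using hcl_idx] at hchsp
          rw [hchsp] at hclns
          simp [pvIsSpace] at hclns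
        obtain ⟨hne, hkle, hskip, hsl⟩ :=
          pvConjCase cs i a 2 st cl hslice_st (by omega) (by omega) hcl hclns
        have hitempos : (pvLStrip (st.drop 2)).length ≠ 0 := by
          simpa [List.length_eq_zero_iff] using hne
        rw [hskip]
        rw [if_neg (show ¬ (i + a + st.length ≤ i + a + st.length - (pvLStrip (st.drop 2)).length)
          from by omega)]
        rw [show i + a + st.length - (i + a + st.length - (pvLStrip (st.drop 2)).length)
              = (pvLStrip (st.drop 2)).length from by omega, hsl]
        simp only [List.singleton_append]
        congr 1
        have h2 : (base + ((i + a + st.length - (pvLStrip (st.drop 2)).length : Nat) : Int) : Int)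
            = base + ((i : Int) + (((seg.length : Nat) : Int) - ((ls.length : Nat) : Int))
                + ((st.length : Nat) : Int)) - (((pvLStrip (st.drop 2)).length : Nat) : Int) := by
          omega
        have h3' : (base + ((i + a + st.length : Nat) : Int) : Int)
            = base + ((i : Int) + (((seg.length : Nat) : Int) - ((ls.length : Nat) : Int))
                + ((st.length : Nat) : Int)) := by
          omega
        rw [h2, h3']
      · simp only [if_neg hamp]
        rw [if_neg (show ¬ (i + a + st.length ≤ i + a) from by omega)]
        rw [show i + a + st.length - (i + a) = st.length from by omega, hslice_st]
        simp only [List.singleton_append]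
        congr 1
        have h2 : (base + ((i + a : Nat) : Int) : Int)
            = base + ((i : Int) + (((seg.length : Nat) : Int) - ((ls.length : Nat) : Int))
                + ((st.length : Nat) : Int)) - ((st.length : Nat) : Int) := by
          omega
        have h3' : (base + ((i + a + st.length : Nat) : Int) : Int)
            = base + ((i : Int) + (((seg.length : Nat) : Int) - ((ls.length : Nat) : Int))
                + ((st.length : Nat) : Int)) := by
          omega
        rw [h2, h3']

theorem pvLoop_eq (fuel : Nat) (cs : List Char) (base : Int) : ∀ (i : Nat),
    i ≤ cs.length → cs.length - i ≤ fuel →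
    pvLoopA cs base i = pvLoopB base (i : Int) (pvSplitComma (cs.drop i)) := by
  induction fuel with
  | zero =>
    intro i hi hf
    have hieq : i = cs.length := by omega
    subst hieq
    rw [pvLoopA_end cs base _ (le_refl _), List.drop_length]
    simp [pvSplitComma, pvLoopB, pvStrip, pvLStrip, pvRStrip]
  | succ fuel ih =>
    intro i hi hf
    rcases Nat.eq_or_lt_of_le hi with heq | hin
    · subst heq
      rw [pvLoopA_end cs base _ (le_refl _), List.drop_length]
      simp [pvSplitComma, pvLoopB, pvStrip, pvLStrip, pvRStrip]
    · set p : Char → Bool := fun c => !(c == ',') with hp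
      set seg : List Char := (cs.drop i).takeWhile p with hseg
      have hseglen : seg.length ≤ cs.length - i := by
        have := (List.takeWhile_sublist p (l := cs.drop i)).length_le
        simpa [hseg] using this
      obtain ⟨tail, hsplit, hrec⟩ : ∃ tail, pvSplitComma (cs.drop i) = seg :: tail ∧
          pvLoopA cs base (i + seg.length + 1)
            = pvLoopB base ((i : Int) + (seg.length : Int) + 1) tail := by
        rcases Nat.lt_or_ge (i + seg.length) cs.length with hcom | hnocom
        · refine ⟨pvSplitComma (cs.drop (i + seg.length + 1)), ?_, ?_⟩
          · rw [pvSplitComma_eq (cs.drop i)]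
            congr 1
            have hdw : (cs.drop i).dropWhile p = cs.drop (i + seg.length) := by
              rw [dropWhile_eq_drop, ← hseg, List.drop_drop]
            rw [hdw, List.drop_eq_getElem_cons hcom]
          · have hihres := ih (i + seg.length + 1) (by omega) (by omega)
            rw [hihres, show ((i + seg.length + 1 : Nat) : Int) = (i : Int) + (seg.length : Int) + 1 from by push_cast; ring]
        · refine ⟨[], ?_, ?_⟩
          · rw [pvSplitComma_eq (cs.drop i)]
            congr 1
            have hdw : (cs.drop i).dropWhile p = [] := by
              rw [dropWhile_eq_drop, ← hseg, List.drop_drop]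
              apply List.drop_eq_nil_of_le
              omega
            rw [hdw]
          · rw [pvLoopA_end cs base _ (by omega), pvLoopB]
      rw [hsplit, pvLoopB_step, ← hrec, hseg, hp]
      exact pvLoopA_step cs base i hin

-- ===== VERDICT (by name: the statement is the Claim_ definition above) =====
theorem iter_list_items_with_spans_py_spec : Claim_equal_iter_list_items_with_spans_py := by
  intro list_text base_start _
  unfold Spec_iter_list_items_with_spans_py iter_list_items_with_spans_py iter_list_items_with_spans_py_alt
  have h := pvLoop_eq list_text.toList.length list_text.toList base_start 0 (Nat.zero_le _) (by omega)
  by_cases hz : list_text.toList = []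
  · simp [hz, pvSplitComma, pvLoopB, pvStrip, pvLStrip, pvRStrip]
  · simpa [hz] using h
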